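-- pv_equiv track=rewrite | github.com/jamemanionda/AiFileDetector_2024 | AiFileDetector_2024/createtraining.py | add_numbers_to_duplicates
-- ===== SOURCE A (Python) =====
-- def add_numbers_to_duplicates(input_list):
--     counts = {}  # 요소별로 카운트를 저장할 딕셔너리
--
--     for i in range(len(input_list[0])):
--         item = input_list[0][i]
--
--         # 이미 등장한 요소인 경우
--         if item in counts:
--             counts[item] += 1
--             input_list[0][i] = f"{item}_{counts[item]}"
--         else:
--             counts[item] = 0
--
--     return input_list
-- ===== SOURCE B (Python) =====
-- def add_numbers_to_duplicates(input_list):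
--     positions = {}
--     for i, item in enumerate(input_list[0]):
--         positions.setdefault(item, []).append(i)
--     for item, idxs in positions.items():
--         for j, i in enumerate(idxs[1:], start=1):
--             input_list[0][i] = f"{item}_{j}"
--     return input_list
-- ===== Notes on version B (the rewrite author's own statement) =====
-- stated objective: alternative
-- what changed: Replaces A's single running-counter pass (rename each element as it is scanned) by two staged passes: first group the row into a dict mapping each item to the ordered list of its occurrence indices, then walk each group and rename every occurrence after the first by its rank within the group.
import Mathlib
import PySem

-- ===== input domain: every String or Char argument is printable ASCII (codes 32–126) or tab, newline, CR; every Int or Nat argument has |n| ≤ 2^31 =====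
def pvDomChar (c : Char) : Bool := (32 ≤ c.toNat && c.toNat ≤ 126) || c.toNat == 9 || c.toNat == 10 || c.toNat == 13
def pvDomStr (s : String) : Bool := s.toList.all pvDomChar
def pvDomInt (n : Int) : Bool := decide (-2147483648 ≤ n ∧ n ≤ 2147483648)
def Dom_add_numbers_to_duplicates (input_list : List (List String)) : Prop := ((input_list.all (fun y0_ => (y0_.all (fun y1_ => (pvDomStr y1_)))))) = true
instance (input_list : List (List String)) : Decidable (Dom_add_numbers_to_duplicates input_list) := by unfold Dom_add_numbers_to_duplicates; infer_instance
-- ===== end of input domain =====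

-- B replaces A's running-counter renaming pass by two staged passes: group the row into a dict
-- item -> ordered occurrence indices, then rename each occurrence after the first by its rank (alternative decomposition, not faster).
-- Both Pythons mutate input_list[0] in place identically; the theorems are about the return value.

-- ===== PORT A =====
-- literal port of A: loop over range(len(row)), state = (counts dict, current row);
-- 'input_list[0][i] = v' is ported as List.set i.toNat v (i comes from range(0, len), so 0 ≤ i < len — exact there)
def add_numbers_to_duplicates (input_list : List (List String)) : List (List String) :=
  match input_list with
  | [] => []   -- Python raises IndexError here; excluded by Pre_
  | row0 :: rest =>
    let st := (PySem.List.pyRange 0 (row0.length : Int) 1).foldl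
      (fun (st : PySem.Dict String Int × List String) i =>
        let item := PySem.List.pyGetD st.2 i ""
        match st.1.get? item with
        | some c => (st.1.insert item (c + 1), st.2.set i.toNat (item ++ "_" ++ PySem.Int.toStr (c + 1)))
        | none => (st.1.insert item 0, st.2))
      (PySem.Dict.empty, row0)
    st.2 :: rest

-- ===== PORT B =====
-- literal port of Source B: first loop builds 'positions' (setdefault(item, []).append(i) = Dict.modify item [] (· ++ [i]));
-- second loop walks positions.items() and sets row[i] for each (j, i) in enumerate(idxs[1:], start=1)
-- (i comes from enumerate of the row, so 0 ≤ i < len — .toNat is exact there)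
def add_numbers_to_duplicates_alt (input_list : List (List String)) : List (List String) :=
  match input_list with
  | [] => []   -- B's Python raises IndexError here too; excluded by Pre_
  | row :: rest =>
    let positions : PySem.Dict String (List Int) :=
      (PySem.List.enumerate row 0).foldl
        (fun d p => d.modify p.2 [] (fun l => l ++ [p.1])) PySem.Dict.empty
    let row' := positions.items.foldl
      (fun (r : List String) g =>
        (PySem.List.enumerate (PySem.List.slice g.2 (some 1) none) 1).foldl
          (fun (r : List String) q => r.set q.2.toNat (g.1 ++ "_" ++ PySem.Int.toStr q.1)) r)
      row
    row' :: rest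

-- ===== PRECONDITION & SPEC =====
-- both Pythons raise IndexError on the empty outer list (input_list[0]); nothing else raises
def Pre_add_numbers_to_duplicates (input_list : List (List String)) : Prop := input_list ≠ []
instance (input_list : List (List String)) : Decidable (Pre_add_numbers_to_duplicates input_list) := by unfold Pre_add_numbers_to_duplicates; infer_instance
def pvWitness_add_numbers_to_duplicates : List (List String) := [["a", "b", "a", "a"]]

def Spec_add_numbers_to_duplicates (input_list : List (List String)) (out : List (List String)) : Prop := out = add_numbers_to_duplicates_alt input_list
instance (input_list : List (List String)) (out : List (List String)) : Decidable (Spec_add_numbers_to_duplicates input_list out) := by unfold Spec_add_numbers_to_duplicates; infer_instance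

-- ===== CLAIM (what is proved, stated in full; the proofs are below) =====
def Claim_equal_add_numbers_to_duplicates : Prop := ∀ (input_list : List (List String)), Dom_add_numbers_to_duplicates input_list → Pre_add_numbers_to_duplicates input_list → Spec_add_numbers_to_duplicates input_list (add_numbers_to_duplicates input_list)

-- ===== LEMMAS AND PROOFS =====

-- the common normal form: position i of the row is renamed by the count of its item in the prefix before i
def pvRename (row : List String) (i : Nat) (x : String) : String :=
  if (row.take i).count x = 0 then x
  else x ++ "_" ++ PySem.Int.toStr ((row.take i).count x : Int)

-- ---- A's loop produces the normal form ----
theorem pvLoopA (row : List String) (n : Nat) (hn : n ≤ row.length) :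
    (∀ x, ((PySem.List.pyRange 0 (n : Int) 1).foldl
      (fun (st : PySem.Dict String Int × List String) i =>
        let item := PySem.List.pyGetD st.2 i ""
        match st.1.get? item with
        | some c => (st.1.insert item (c + 1), st.2.set i.toNat (item ++ "_" ++ PySem.Int.toStr (c + 1)))
        | none => (st.1.insert item 0, st.2))
      (PySem.Dict.empty, row)).1.get? x
        = (if (row.take n).count x = 0 then none else some (((row.take n).count x : Int) - 1)))
    ∧ ((PySem.List.pyRange 0 (n : Int) 1).foldl
      (fun (st : PySem.Dict String Int × List String) i =>
        let item := PySem.List.pyGetD st.2 i ""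
        match st.1.get? item with
        | some c => (st.1.insert item (c + 1), st.2.set i.toNat (item ++ "_" ++ PySem.Int.toStr (c + 1)))
        | none => (st.1.insert item 0, st.2))
      (PySem.Dict.empty, row)).2
        = (row.take n).mapIdx (fun i x => pvRename row i x) ++ row.drop n := by
  induction n with
  | zero =>
    simp [PySem.List.pyRange_one_eq_nil (by omega : (0:Int) ≤ 0), PySem.Dict.get?_empty]
  | succ n ih =>
    have hn' : n ≤ row.length := by omega
    have hlt : n < row.length := by omega
    obtain ⟨ih1, ih2⟩ := ih hn'
    have hsplit : PySem.List.pyRange 0 ((n+1 : Nat) : Int) 1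
        = PySem.List.pyRange 0 (n : Int) 1 ++ [(n : Int)] := by
      push_cast
      exact PySem.List.pyRange_one_succ_right (by omega)
    rw [hsplit, List.foldl_append]
    set st := (PySem.List.pyRange 0 (n : Int) 1).foldl
      (fun (st : PySem.Dict String Int × List String) i =>
        let item := PySem.List.pyGetD st.2 i ""
        match st.1.get? item with
        | some c => (st.1.insert item (c + 1), st.2.set i.toNat (item ++ "_" ++ PySem.Int.toStr (c + 1)))
        | none => (st.1.insert item 0, st.2))
      (PySem.Dict.empty, row) with hst
    have hprelen : ((row.take n).mapIdx (fun i x => pvRename row i x)).length = n := by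
      simp [List.length_take, Nat.min_eq_left hn']
    have hitem : PySem.List.pyGetD st.2 (n : Int) "" = row[n] := by
      rw [ih2, PySem.List.pyGetD_natCast, List.getD_eq_getElem?_getD,
        List.getElem?_append_right (by rw [hprelen])]
      rw [hprelen, Nat.sub_self]
      simp [List.getElem?_drop, List.getElem?_eq_getElem hlt]
    have htake : row.take (n+1) = row.take n ++ [row[n]] := by
      rw [List.take_add_one]
      simp [List.getElem?_eq_getElem hlt]
    have hdrop : row.drop n = row[n] :: row.drop (n+1) := (List.getElem_cons_drop hlt).symm
    have hcnt_self : List.count row[n] (row.take (n+1)) = List.count row[n] (row.take n) + 1 := by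
      rw [htake, List.count_append, List.count_singleton]
      simp
    have hcnt_ne : ∀ x : String, x ≠ row[n] → List.count x (row.take (n+1)) = List.count x (row.take n) := by
      intro x hx
      rw [htake, List.count_append, List.count_singleton]
      rw [beq_false_of_ne (Ne.symm hx)]
      simp
    have htake1 : ((row.take n).mapIdx (fun i x => pvRename row i x)).length = (row.take n).length := by
      simp
    have hmapidx : (row.take (n+1)).mapIdx (fun i x => pvRename row i x)
        = (row.take n).mapIdx (fun i x => pvRename row i x) ++ [pvRename row n row[n]] := by
      rw [htake, List.mapIdx_append]
      simp [List.length_take, Nat.min_eq_left hn']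
    simp only [List.foldl_cons, List.foldl_nil, hitem]
    by_cases h0 : List.count row[n] (row.take n) = 0
    · rw [ih1 row[n], if_pos h0]
      refine ⟨fun x => ?_, ?_⟩
      · show (st.1.insert row[n] 0).get? x = _
        rw [PySem.Dict.get?_insert]
        by_cases hx : x = row[n]
        · subst hx
          rw [if_pos rfl, hcnt_self, h0]
          norm_num
        · rw [if_neg hx, ih1 x, hcnt_ne x hx]
      · show st.2 = _
        rw [ih2, hmapidx, hdrop]
        have : pvRename row n row[n] = row[n] := by simp [pvRename, h0]
        rw [this]
        simp
    · rw [ih1 row[n], if_neg h0]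
      refine ⟨fun x => ?_, ?_⟩
      · show (st.1.insert row[n] ((List.count row[n] (row.take n) : Int) - 1 + 1)).get? x = _
        rw [PySem.Dict.get?_insert]
        by_cases hx : x = row[n]
        · subst hx
          rw [if_pos rfl, hcnt_self, if_neg (by omega : ¬ (List.count row[n] (row.take n) + 1 = 0))]
          congr 1
          push_cast
          ring
        · rw [if_neg hx, ih1 x, hcnt_ne x hx]
      · show (st.2.set ((n : Int)).toNat (row[n] ++ "_" ++ PySem.Int.toStr ((List.count row[n] (row.take n) : Int) - 1 + 1))) = _
        rw [ih2, hdrop, Int.toNat_natCast,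
          List.set_append_right _ _ (by rw [hprelen]), hprelen, Nat.sub_self, List.set_cons_zero,
          hmapidx]
        have : pvRename row n row[n]
            = row[n] ++ "_" ++ PySem.Int.toStr ((List.count row[n] (row.take n) : Int) - 1 + 1) := by
          have hc : ((List.count row[n] (row.take n) : Int) - 1 + 1) = (List.count row[n] (row.take n) : Int) := by ring
          rw [hc]
          simp [pvRename, h0]
        rw [this]
        simp

-- ---- B-side: the occurrence-index list of x in l (what B's dict stores) ----
def pvPos (l : List String) (s : Int) (x : String) : List Int :=
  ((PySem.List.enumerate l s).filter (fun p => p.2 == x)).map (·.1)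

theorem pvPos_getElem (l : List String) (s : Int) (x : String) :
    ∀ (j : Nat) (h : j < (pvPos l s x).length),
      ∃ (k : Nat) (hk : k < l.length), (pvPos l s x)[j] = s + k ∧ l[k] = x ∧ (l.take k).count x = j := by
  induction l generalizing s with
  | nil => intro j h; simp [pvPos, PySem.List.enumerate_nil] at h
  | cons y t ih =>
    intro j h
    by_cases hyx : y = x
    · have hpos : pvPos (y :: t) s x = s :: pvPos t (s+1) x := by
        simp [pvPos, PySem.List.enumerate_cons, hyx]
      match j with
      | 0 => exact ⟨0, by simp, by simp [hpos], by simp [hyx], by simp⟩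
      | j+1 =>
        simp only [hpos] at h ⊢
        have h' : j < (pvPos t (s+1) x).length := by simpa using h
        obtain ⟨k, hk, hv, hx, hc⟩ := ih (s+1) j h'
        refine ⟨k+1, by simp only [List.length_cons]; omega, ?_, by simpa using hx, ?_⟩
        · simp only [List.getElem_cons_succ, hv]; push_cast; ring
        · simp [List.take_succ_cons, hyx, hc]
    · have hpos : pvPos (y :: t) s x = pvPos t (s+1) x := by
        simp [pvPos, PySem.List.enumerate_cons, hyx]
      simp only [hpos] at h ⊢
      obtain ⟨k, hk, hv, hx, hc⟩ := ih (s+1) j h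
      refine ⟨k+1, by simp only [List.length_cons]; omega, ?_, by simpa using hx, ?_⟩
      · rw [hv]; push_cast; ring
      · simp [List.take_succ_cons, hyx, hc]

theorem pvPos_rank (l : List String) (s : Int) (x : String) :
    ∀ (k : Nat) (hk : k < l.length), l[k] = x →
      (pvPos l s x)[(l.take k).count x]? = some (s + k) := by
  induction l generalizing s with
  | nil => intro k hk; simp at hk
  | cons y t ih =>
    intro k hk hkx
    match k with
    | 0 =>
      have hyx : y = x := hkx
      have hpos : pvPos (y :: t) s x = s :: pvPos t (s+1) x := by
        simp [pvPos, PySem.List.enumerate_cons, hyx]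
      simp [hpos]
    | k+1 =>
      have hk' : k < t.length := by simpa using hk
      have hkx' : t[k] = x := by simpa using hkx
      have hv := ih (s+1) k hk' hkx'
      by_cases hyx : y = x
      · have hpos : pvPos (y :: t) s x = s :: pvPos t (s+1) x := by
          simp [pvPos, PySem.List.enumerate_cons, hyx]
        have hcnt : ((y :: t).take (k+1)).count x = (t.take k).count x + 1 := by
          simp [List.take_succ_cons, hyx]
        rw [hpos, hcnt, List.getElem?_cons_succ, hv]
        congr 1
        push_cast
        ring
      · have hpos : pvPos (y :: t) s x = pvPos t (s+1) x := by
          simp [pvPos, PySem.List.enumerate_cons, hyx]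
        have hcnt : ((y :: t).take (k+1)).count x = (t.take k).count x := by
          simp [List.take_succ_cons, hyx]
        rw [hpos, hcnt, hv]
        congr 1
        push_cast
        ring

-- ---- B's dict has exactly the groups (item, occurrence indices) ----
theorem pvItems (row : List String) :
    ((PySem.List.enumerate row 0).foldl
        (fun d p => d.modify p.2 [] (fun l => l ++ [p.1])) PySem.Dict.empty).items
      = (PySem.Set.ofList row).map (fun x => (x, pvPos row 0 x)) := by
  set d := (PySem.List.enumerate row 0).foldl
      (fun d p => d.modify p.2 [] (fun l => l ++ [p.1])) PySem.Dict.empty with hd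
  have hnodup : d.keys.Nodup := by
    rw [hd]
    exact PySem.Dict.nodup_keys_foldl_modify_key _ _ _ _ _ PySem.Dict.nodup_keys_empty
  have hkeys : d.keys = PySem.Set.ofList row := by
    rw [hd, PySem.Dict.keys_foldl_modify_key]
    simp [PySem.Dict.keys_empty, PySem.List.map_snd_enumerate]
    rfl
  have hswap : d = ((PySem.List.enumerate row 0).map (fun p => (p.2, p.1))).foldl
      (fun d p => d.modify p.1 [] (fun l => l ++ [p.2])) PySem.Dict.empty := by
    rw [hd, List.foldl_map]
  have hgetD : ∀ c, d.getD c [] = pvPos row 0 c := by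
    intro c
    rw [hswap, PySem.Dict.getD_foldl_modify_append]
    simp [pvPos, List.filter_map, List.map_map, Function.comp_def]
  rw [PySem.Dict.items_eq_map_keys d hnodup [], hkeys]
  exact List.map_congr_left (fun x _ => by rw [hgetD x])

-- ---- a fold of single-index writes, all consistent with one function F ----
theorem pvSetAll_length (ups : List (Int × String)) (l : List String) :
    (ups.foldl (fun r p => r.set p.1.toNat p.2) l).length = l.length := by
  induction ups generalizing l with
  | nil => rfl
  | cons p rest ih => simp [List.foldl_cons, ih]

theorem pvSetAll_getElem (ups : List (Int × String)) (l : List String) (F : Nat → String)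
    (hF : ∀ p ∈ ups, 0 ≤ p.1 ∧ p.2 = F p.1.toNat) (k : Nat) (hk : k < l.length)
    (hk2 : k < (ups.foldl (fun r p => r.set p.1.toNat p.2) l).length) :
    (ups.foldl (fun r p => r.set p.1.toNat p.2) l)[k]
      = if ups.any (fun p => p.1 == (k : Int)) then F k else l[k] := by
  induction ups generalizing l with
  | nil => simp
  | cons p rest ih =>
    obtain ⟨hp0, hpF⟩ := hF p (by simp)
    have hF' : ∀ q ∈ rest, 0 ≤ q.1 ∧ q.2 = F q.1.toNat := fun q hq => hF q (by simp [hq])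
    have hlen : k < (l.set p.1.toNat p.2).length := by simpa using hk
    have hlen2 : k < (rest.foldl (fun r p => r.set p.1.toNat p.2) (l.set p.1.toNat p.2)).length := by
      rw [pvSetAll_length]; exact hlen
    simp only [List.foldl_cons]
    rw [ih (l.set p.1.toNat p.2) hF' hlen hlen2]
    by_cases hr : rest.any (fun q => q.1 == (k : Int)) = true
    · simp [hr]
    · simp only [Bool.not_eq_true] at hr
      by_cases hpk : p.1 = (k : Int)
      · have ht : p.1.toNat = k := by omega
        simp [hr, hpk, hpF]
      · have ht : p.1.toNat ≠ k := by omega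
        simp [hr, hpk, ht]

-- ---- the flattened update list of B's second loop ----
def pvUps (row : List String) : List (Int × String) :=
  (PySem.Set.ofList row).flatMap (fun x =>
    (PySem.List.enumerate ((pvPos row 0 x).drop 1) 1).map
      (fun q => (q.2, x ++ "_" ++ PySem.Int.toStr q.1)))

theorem pvMem_ups (row : List String) (p : Int × String) (hp : p ∈ pvUps row) :
    ∃ (k : Nat) (hk : k < row.length), p.1 = (k : Int) ∧ 1 ≤ (row.take k).count row[k] ∧
      p.2 = row[k] ++ "_" ++ PySem.Int.toStr (((row.take k).count row[k] : Int)) := by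
  unfold pvUps at hp
  rw [List.mem_flatMap] at hp
  obtain ⟨x, hx, hpin⟩ := hp
  rw [List.mem_map] at hpin
  obtain ⟨q, hq, rfl⟩ := hpin
  rw [PySem.List.mem_enumerate_iff] at hq
  obtain ⟨m, hm, rfl⟩ := hq
  have hm' : 1 + m < (pvPos row 0 x).length := by
    simp only [List.length_drop] at hm
    omega
  have hget : ((pvPos row 0 x).drop 1)[m] = (pvPos row 0 x)[1+m] := List.getElem_drop ..
  obtain ⟨k, hk, hv, hxk, hc⟩ := pvPos_getElem row 0 x (1+m) hm'
  refine ⟨k, hk, ?_, ?_, ?_⟩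
  · show ((pvPos row 0 x).drop 1)[m] = (k : Int)
    rw [hget, hv]
    ring
  · rw [hxk, hc]; omega
  · rw [hxk, hc]
    show x ++ "_" ++ PySem.Int.toStr (1 + (m:Int)) = x ++ "_" ++ PySem.Int.toStr (((1+m : Nat) : Int))
    norm_cast

theorem pvAny_ups (row : List String) (k : Nat) (hk : k < row.length) :
    (pvUps row).any (fun p => p.1 == (k : Int)) = true ↔ 1 ≤ (row.take k).count row[k] := by
  constructor
  · intro h
    rw [List.any_eq_true] at h
    obtain ⟨p, hp, hpk⟩ := h
    obtain ⟨k', hk', h1, hcnt, h2⟩ := pvMem_ups row p hp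
    have hkk : k' = k := by
      rw [h1] at hpk
      simpa using hpk
    subst hkk
    exact hcnt
  · intro hc
    set x := row[k] with hx
    have hxmem : x ∈ PySem.Set.ofList row := by
      rw [PySem.Set.mem_ofList]
      exact hx ▸ List.getElem_mem hk
    have hrank := pvPos_rank row 0 x k hk hx.symm
    set c := (row.take k).count x with hcdef
    have hdrop : ((pvPos row 0 x).drop 1)[c-1]? = some ((0:Int) + k) := by
      rw [List.getElem?_drop]
      have h1c : 1 + (c-1) = c := by omega
      rw [h1c, hrank]
    obtain ⟨hcl, hval⟩ := List.getElem?_eq_some_iff.mp hdrop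
    have hqmem : ((1 : Int) + ((c-1 : Nat) : Int), ((pvPos row 0 x).drop 1)[c-1]'hcl)
        ∈ PySem.List.enumerate ((pvPos row 0 x).drop 1) 1 := by
      rw [PySem.List.mem_enumerate_iff]
      exact ⟨c-1, hcl, rfl⟩
    have hmem2 := List.mem_map_of_mem (f := fun q => (q.2, x ++ "_" ++ PySem.Int.toStr q.1)) hqmem
    have hmem3 : _ ∈ pvUps row := List.mem_flatMap.mpr ⟨x, hxmem, hmem2⟩
    have hvk : ((List.drop 1 (pvPos row 0 x))[c-1]'hcl) = (k : Int) := by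
      rw [hval]
      ring
    rw [List.any_eq_true]
    refine ⟨_, hmem3, ?_⟩
    show (((List.drop 1 (pvPos row 0 x))[c - 1]'hcl) == (k : Int)) = true
    rw [hvk]
    simp

-- ---- B's second loop produces the normal form ----
theorem pvAltRow (row : List String) :
    (((PySem.List.enumerate row 0).foldl
        (fun d p => d.modify p.2 [] (fun l => l ++ [p.1])) PySem.Dict.empty).items.foldl
      (fun (r : List String) g =>
        (PySem.List.enumerate (PySem.List.slice g.2 (some 1) none) 1).foldl
          (fun (r : List String) q => r.set q.2.toNat (g.1 ++ "_" ++ PySem.Int.toStr q.1)) r)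
      row)
      = row.mapIdx (fun i x => pvRename row i x) := by
  simp only [pvItems, List.foldl_map]
  have hstep : ∀ x ∈ PySem.Set.ofList row, ∀ r : List String,
      (PySem.List.enumerate (PySem.List.slice (pvPos row 0 x) (some 1) none) 1).foldl
        (fun (r : List String) q => r.set q.2.toNat (x ++ "_" ++ PySem.Int.toStr q.1)) r
      = ((PySem.List.enumerate ((pvPos row 0 x).drop 1) 1).map
          (fun q => (q.2, x ++ "_" ++ PySem.Int.toStr q.1))).foldl
          (fun (r : List String) p => r.set p.1.toNat p.2) r := by
    intro x _ r
    rw [PySem.List.slice_from _ (by norm_num : (0:Int) ≤ 1), List.foldl_map]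
    norm_num
  rw [PySem.List.foldl_congr_mem' (PySem.Set.ofList row)
      (fun (r : List String) (x : String) =>
        (PySem.List.enumerate (PySem.List.slice (pvPos row 0 x) (some 1) none) 1).foldl
          (fun r q => r.set q.2.toNat (x ++ "_" ++ PySem.Int.toStr q.1)) r)
      (fun (r : List String) (x : String) =>
        ((PySem.List.enumerate ((pvPos row 0 x).drop 1) 1).map
          (fun q => (q.2, x ++ "_" ++ PySem.Int.toStr q.1))).foldl
          (fun r p => r.set p.1.toNat p.2) r)
      row hstep, ← List.foldl_flatMap]
  show (pvUps row).foldl (fun (r : List String) (p : Int × String) => r.set p.1.toNat p.2) row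
      = row.mapIdx (fun i x => pvRename row i x)
  have hFF : ∀ p ∈ pvUps row, 0 ≤ p.1 ∧ p.2 = (fun i => pvRename row i (row.getD i "")) p.1.toNat := by
    intro p hp
    obtain ⟨k, hk, h1, hcnt, h2⟩ := pvMem_ups row p hp
    refine ⟨by rw [h1]; exact Int.natCast_nonneg k, ?_⟩
    show p.2 = pvRename row p.1.toNat (row.getD p.1.toNat "")
    have hgd : row.getD k "" = row[k] := by
      rw [List.getD_eq_getElem?_getD, List.getElem?_eq_getElem hk]
      rfl
    rw [h1, Int.toNat_natCast, hgd, h2, pvRename, if_neg (by omega)]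
  apply List.ext_getElem
  · rw [pvSetAll_length]
    simp
  · intro k hk1 hk2
    have hkr : k < row.length := by
      rw [pvSetAll_length] at hk1
      exact hk1
    rw [pvSetAll_getElem (pvUps row) row (fun i => pvRename row i (row.getD i "")) hFF k hkr hk1,
      List.getElem_mapIdx]
    have hgd : row.getD k "" = row[k] := by
      rw [List.getD_eq_getElem?_getD, List.getElem?_eq_getElem hkr]
      rfl
    by_cases hany : (pvUps row).any (fun p => p.1 == (k:Int)) = true
    · rw [if_pos hany]
      simp only [hgd]
    · rw [if_neg hany]
      have hc : ¬ 1 ≤ (row.take k).count row[k] := fun h => hany ((pvAny_ups row k hkr).mpr h)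
      have hc0 : (row.take k).count row[k] = 0 := by omega
      rw [pvRename, if_pos hc0]

-- ===== VERDICT (by name: the statement is the Claim_ definition above) =====
theorem add_numbers_to_duplicates_spec : Claim_equal_add_numbers_to_duplicates := by
  intro input_list _ hpre
  unfold Spec_add_numbers_to_duplicates
  match input_list with
  | [] => exact absurd rfl hpre
  | row :: rest =>
    simp only [add_numbers_to_duplicates, add_numbers_to_duplicates_alt]
    rw [pvAltRow row]
    have h := (pvLoopA row row.length le_rfl).2
    simp only [List.take_length, List.drop_length, List.append_nil] at h
    simp [h]
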